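-- pv_equiv track=rewrite | github.com/vthglyk/Traffic-Handling | traffic_handling.py | construct_messages
-- ===== SOURCE A (Python) =====
-- def construct_messages(old_blacklist, new_blacklist):
--     rules_to_delete = []
--
--     for i in old_blacklist:
--         if i not in new_blacklist:
--             rules_to_delete.append(i)
--         else:
--             new_blacklist.remove(i)
--
--     rules_to_add = new_blacklist
--     return [rules_to_add, rules_to_delete]
-- ===== SOURCE B (Python) =====
-- def construct_messages(old_blacklist, new_blacklist):
--     # Multiplicity table of new_blacklist built once; one pass over old_blacklist
--     # decides delete-vs-match, a second pass rebuilds the remaining new entries.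
--     avail = {}
--     for x in new_blacklist:
--         avail[x] = avail.get(x, 0) + 1
--     matched = {}
--     rules_to_delete = []
--     for x in old_blacklist:
--         if matched.get(x, 0) < avail.get(x, 0):
--             matched[x] = matched.get(x, 0) + 1
--         else:
--             rules_to_delete.append(x)
--     remaining = []
--     skip = dict(matched)
--     for x in new_blacklist:
--         if skip.get(x, 0) > 0:
--             skip[x] = skip[x] - 1
--         else:
--             remaining.append(x)
--     new_blacklist[:] = remaining  # same in-place mutation as A
--     return [new_blacklist, rules_to_delete]
-- ===== Notes on version B (the rewrite author's own statement) =====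
-- stated objective: faster
-- what changed: Replaces A's per-element membership test and list.remove on the mutating new_blacklist with a precomputed multiplicity table: one counting pass, one pass over old_blacklist maintaining a matched counter, and one rebuild pass over new_blacklist skipping matched occurrences.
import Mathlib
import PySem

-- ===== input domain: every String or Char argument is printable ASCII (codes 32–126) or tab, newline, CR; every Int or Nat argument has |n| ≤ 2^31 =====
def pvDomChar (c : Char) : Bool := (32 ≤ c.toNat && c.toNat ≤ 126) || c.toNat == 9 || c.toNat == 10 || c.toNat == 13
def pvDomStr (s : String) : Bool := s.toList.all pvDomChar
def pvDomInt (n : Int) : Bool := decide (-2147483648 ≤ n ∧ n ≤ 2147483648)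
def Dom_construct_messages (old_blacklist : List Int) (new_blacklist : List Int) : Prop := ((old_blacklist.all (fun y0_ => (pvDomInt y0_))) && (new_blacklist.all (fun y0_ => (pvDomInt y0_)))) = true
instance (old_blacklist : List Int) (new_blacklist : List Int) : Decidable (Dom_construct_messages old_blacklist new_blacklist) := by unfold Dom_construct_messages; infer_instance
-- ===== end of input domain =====

-- B replaces A's quadratic membership-test/remove loop by a counting pass plus two linear passes.
-- Both Pythons mutate new_blacklist in place identically; the theorems here are about the return value.

-- ===== PORT A =====
def construct_messages (old_blacklist : List Int) (new_blacklist : List Int) : List (List Int) :=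
  let s := old_blacklist.foldl (fun (s : List Int × List Int) i =>
    if s.1.contains i = false then (s.1, s.2 ++ [i])
    else ((PySem.List.remove? s.1 i).getD s.1, s.2)) (new_blacklist, [])
  [s.1, s.2]

-- ===== PORT B =====
def construct_messages_alt (old_blacklist : List Int) (new_blacklist : List Int) : List (List Int) :=
  let avail := new_blacklist.foldl (fun (d : PySem.Dict Int Int) x => d.insert x (d.getD x 0 + 1)) PySem.Dict.empty
  let s1 := old_blacklist.foldl (fun (s : PySem.Dict Int Int × List Int) x =>
    if s.1.getD x 0 < avail.getD x 0 then (s.1.insert x (s.1.getD x 0 + 1), s.2)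
    else (s.1, s.2 ++ [x])) (PySem.Dict.empty, [])
  let s2 := new_blacklist.foldl (fun (s : PySem.Dict Int Int × List Int) x =>
    if 0 < s.1.getD x 0 then (s.1.insert x (s.1.getD x 0 - 1), s.2)
    else (s.1, s.2 ++ [x])) (s1.1, [])
  [s2.2, s1.2]

-- ===== PRECONDITION & SPEC =====
def Spec_construct_messages (old_blacklist : List Int) (new_blacklist : List Int) (out : List (List Int)) : Prop := out = construct_messages_alt old_blacklist new_blacklist
instance (old_blacklist : List Int) (new_blacklist : List Int) (out : List (List Int)) : Decidable (Spec_construct_messages old_blacklist new_blacklist out) := by unfold Spec_construct_messages; infer_instance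

-- ===== CLAIM (what is proved, stated in full; the proofs are below) =====
def Claim_equal_construct_messages : Prop := ∀ (old_blacklist : List Int) (new_blacklist : List Int), Dom_construct_messages old_blacklist new_blacklist → Spec_construct_messages old_blacklist new_blacklist (construct_messages old_blacklist new_blacklist)

-- ===== LEMMAS AND PROOFS =====

-- `skipF f l` drops, for each value x, the first `f x` occurrences of x from l.
def skipF : (Int → Int) → List Int → List Int
  | _, [] => []
  | f, y :: ys => if 0 < f y then skipF (Function.update f y (f y - 1)) ys else y :: skipF f ys

theorem skipF_zero (l : List Int) : skipF (fun _ => 0) l = l := by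
  induction l with
  | nil => rfl
  | cons y ys ih => simp [skipF, ih]

theorem update_nonneg (f : Int → Int) (y v : Int) (hf : ∀ z, 0 ≤ f z) (hv : 0 ≤ v) :
    ∀ z, 0 ≤ Function.update f y v z := by
  intro z
  by_cases hz : z = y
  · subst hz; simpa [Function.update_apply] using hv
  · simpa [Function.update_apply, hz] using hf z

theorem mem_skipF (l : List Int) : ∀ (f : Int → Int), (∀ z, 0 ≤ f z) → ∀ x, (x ∈ skipF f l ↔ f x < (l.count x : Int)) := by
  induction l with
  | nil => intro f hf x; simpa [skipF] using not_lt.mpr (hf x)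
  | cons y ys ih =>
    intro f hf x
    by_cases hy : 0 < f y
    · have hf' := update_nonneg f y (f y - 1) hf (by omega)
      rw [skipF, if_pos hy, ih _ hf' x]
      by_cases hx : x = y
      · subst hx
        rw [Function.update_self, List.count_cons_self]
        push_cast; omega
      · have hyx : ¬ (y = x) := fun h => hx h.symm
        simp [Function.update_apply, hx, List.count_cons, hyx]
    · have hfy : f y = 0 := le_antisymm (not_lt.mp hy) (hf y)
      rw [skipF, if_neg hy]
      by_cases hx : x = y
      · subst hx
        simp only [List.mem_cons, true_or, List.count_cons_self, hfy, true_iff]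
        push_cast; omega
      · have hyx : ¬ (y = x) := fun h => hx h.symm
        simp [hx, ih _ hf x, List.count_cons, hyx]

theorem remove?_skipF (l : List Int) : ∀ (f : Int → Int), (∀ z, 0 ≤ f z) → ∀ x, f x < (l.count x : Int) →
    PySem.List.remove? (skipF f l) x = some (skipF (Function.update f x (f x + 1)) l) := by
  induction l with
  | nil => intro f hf x hx; exact absurd hx (not_lt.mpr (by simpa using hf x))
  | cons y ys ih =>
    intro f hf x hx
    by_cases hy : 0 < f y
    · have hf' := update_nonneg f y (f y - 1) hf (by omega)
      rw [skipF, if_pos hy]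
      by_cases hxy : x = y
      · subst hxy
        have hcnt : Function.update f x (f x - 1) x < (ys.count x : Int) := by
          rw [Function.update_self]
          simp only [List.count_cons_self] at hx
          push_cast at hx ⊢; omega
        rw [ih _ hf' x hcnt]
        have h1 : Function.update (Function.update f x (f x - 1)) x (Function.update f x (f x - 1) x + 1) = f := by
          funext z; by_cases hz : z = x <;> simp [Function.update_apply, hz]
        have hy2 : 0 < Function.update f x (f x + 1) x := by
          rw [Function.update_self]; have := hf x; omega
        rw [h1]
        conv_rhs => rw [skipF, if_pos hy2]
        have h2 : Function.update (Function.update f x (f x + 1)) x (Function.update f x (f x + 1) x - 1) = f := by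
          funext z; by_cases hz : z = x <;> simp [Function.update_apply, hz]
        rw [h2]
      · have hyx : ¬ (y = x) := fun h => hxy h.symm
        have hcnt : Function.update f y (f y - 1) x < (ys.count x : Int) := by
          simp only [Function.update_apply, if_neg hxy]
          simpa [List.count_cons, hyx] using hx
        rw [ih _ hf' x hcnt]
        have hy2 : 0 < Function.update f x (f x + 1) y := by
          simpa [Function.update_apply, hyx] using hy
        conv_rhs => rw [skipF, if_pos hy2]
        have h2 : Function.update (Function.update f y (f y - 1)) x (Function.update f y (f y - 1) x + 1)
            = Function.update (Function.update f x (f x + 1)) y (Function.update f x (f x + 1) y - 1) := by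
          funext z
          by_cases hz : z = x
          · subst hz; simp [Function.update_apply, hxy, hyx]
          · by_cases hz2 : z = y <;> simp [Function.update_apply, hz, hz2, hxy, hyx]
        rw [h2]
    · have hfy : f y = 0 := le_antisymm (not_lt.mp hy) (hf y)
      rw [skipF, if_neg hy]
      by_cases hxy : x = y
      · subst hxy
        rw [PySem.List.remove?_cons_self]
        have hy2 : 0 < Function.update f x (f x + 1) x := by
          rw [Function.update_self]; have := hf x; omega
        conv_rhs => rw [skipF, if_pos hy2]
        have h2 : Function.update (Function.update f x (f x + 1)) x (Function.update f x (f x + 1) x - 1) = f := by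
          funext z; by_cases hz : z = x <;> simp [Function.update_apply, hz, hfy]
        rw [h2]
      · have hyx : ¬ (y = x) := fun h => hxy h.symm
        have hyx' : y ≠ x := hyx
        rw [PySem.List.remove?_cons_of_ne _ hyx']
        have hcnt : f x < (ys.count x : Int) := by simpa [List.count_cons, hyx] using hx
        rw [ih _ hf x hcnt]
        have hy2 : ¬ 0 < Function.update f x (f x + 1) y := by
          simp [hyx, hfy]
        conv_rhs => rw [skipF, if_neg hy2]
        rfl

-- the abstract version of B's first pass
def bStep (new : List Int) (s : (Int → Int) × List Int) (x : Int) : (Int → Int) × List Int :=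
  if s.1 x < (new.count x : Int) then (Function.update s.1 x (s.1 x + 1), s.2) else (s.1, s.2 ++ [x])

theorem passA_eq (new : List Int) : ∀ (old : List Int) (f : Int → Int) (dels : List Int), (∀ z, 0 ≤ f z) →
    old.foldl (fun (s : List Int × List Int) i =>
      if s.1.contains i = false then (s.1, s.2 ++ [i])
      else ((PySem.List.remove? s.1 i).getD s.1, s.2)) (skipF f new, dels)
    = ((skipF (old.foldl (bStep new) (f, dels)).1 new), (old.foldl (bStep new) (f, dels)).2) := by
  intro old
  induction old with
  | nil => intro f dels hf; simp
  | cons i rest ih =>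
    intro f dels hf
    simp only [List.foldl_cons]
    by_cases h : f i < (new.count i : Int)
    · have hmem : (skipF f new).contains i = true := by
        simpa [List.contains_iff_mem] using (mem_skipF new f hf i).mpr h
      have hf' := update_nonneg f i (f i + 1) hf (by have := hf i; omega)
      rw [if_neg (by rw [hmem]; simp), remove?_skipF new f hf i h]
      show List.foldl _ (skipF (Function.update f i (f i + 1)) new, dels) rest = _
      rw [ih _ dels hf']
      have : bStep new (f, dels) i = (Function.update f i (f i + 1), dels) := by
        simp [bStep, if_pos h]
      rw [this]
    · have hmem : (skipF f new).contains i = false := by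
        simp [mem_skipF new f hf i, h]
      rw [if_pos hmem, ih f (dels ++ [i]) hf]
      have : bStep new (f, dels) i = (f, dels ++ [i]) := by simp [bStep, if_neg h]
      rw [this]

theorem pass1_dict (avail : PySem.Dict Int Int) (new : List Int) (hav : ∀ z, avail.getD z 0 = (new.count z : Int)) :
    ∀ (old : List Int) (d : PySem.Dict Int Int) (dels : List Int),
      (∀ x, (old.foldl (fun (s : PySem.Dict Int Int × List Int) x =>
          if s.1.getD x 0 < avail.getD x 0 then (s.1.insert x (s.1.getD x 0 + 1), s.2)
          else (s.1, s.2 ++ [x])) (d, dels)).1.getD x 0 = (old.foldl (bStep new) (fun z => d.getD z 0, dels)).1 x)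
      ∧ (old.foldl (fun (s : PySem.Dict Int Int × List Int) x =>
          if s.1.getD x 0 < avail.getD x 0 then (s.1.insert x (s.1.getD x 0 + 1), s.2)
          else (s.1, s.2 ++ [x])) (d, dels)).2 = (old.foldl (bStep new) (fun z => d.getD z 0, dels)).2 := by
  intro old
  induction old with
  | nil => intro d dels; exact ⟨fun x => rfl, rfl⟩
  | cons i rest ih =>
    intro d dels
    simp only [List.foldl_cons]
    by_cases h : d.getD i 0 < (new.count i : Int)
    · have hc : d.getD i 0 < avail.getD i 0 := by rw [hav i]; exact h
      rw [if_pos hc]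
      have hb : bStep new (fun z => d.getD z 0, dels) i = (Function.update (fun z => d.getD z 0) i (d.getD i 0 + 1), dels) := by
        simp [bStep, if_pos h]
      rw [hb]
      have hfun : (fun z => (d.insert i (d.getD i 0 + 1)).getD z 0)
          = Function.update (fun z => d.getD z 0) i (d.getD i 0 + 1) := by
        funext z; by_cases hz : z = i <;> simp [PySem.Dict.getD_insert, Function.update_apply, hz]
      rw [← hfun]
      exact ih (d.insert i (d.getD i 0 + 1)) dels
    · have hc : ¬ d.getD i 0 < avail.getD i 0 := by rw [hav i]; exact h
      rw [if_neg hc]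
      have hb : bStep new (fun z => d.getD z 0, dels) i = (fun z => d.getD z 0, dels ++ [i]) := by
        simp [bStep, if_neg h]
      rw [hb]
      exact ih d (dels ++ [i])

theorem pass2_dict : ∀ (l : List Int) (d : PySem.Dict Int Int) (f : Int → Int) (acc : List Int),
    (∀ z, d.getD z 0 = f z) →
    (l.foldl (fun (s : PySem.Dict Int Int × List Int) x =>
      if 0 < s.1.getD x 0 then (s.1.insert x (s.1.getD x 0 - 1), s.2)
      else (s.1, s.2 ++ [x])) (d, acc)).2 = acc ++ skipF f l := by
  intro l
  induction l with
  | nil => intro d f acc _; simp [skipF]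
  | cons y ys ih =>
    intro d f acc hd
    simp only [List.foldl_cons]
    by_cases h : 0 < f y
    · have hc : 0 < d.getD y 0 := by rw [hd y]; exact h
      rw [if_pos hc, skipF, if_pos h]
      have hfun : ∀ z, (d.insert y (d.getD y 0 - 1)).getD z 0 = Function.update f y (f y - 1) z := by
        intro z; by_cases hz : z = y <;> simp [PySem.Dict.getD_insert, Function.update_apply, hz, hd z, hd y]
      exact ih _ _ acc hfun
    · have hc : ¬ 0 < d.getD y 0 := by rw [hd y]; exact h
      rw [if_neg hc, skipF, if_neg h, ih d f (acc ++ [y]) hd]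
      simp

-- ===== VERDICT (by name: the statement is the Claim_ definition above) =====
theorem construct_messages_spec : Claim_equal_construct_messages := by
  intro old new _
  show construct_messages old new = construct_messages_alt old new
  unfold construct_messages construct_messages_alt
  have hav : ∀ z, (new.foldl (fun (d : PySem.Dict Int Int) x => d.insert x (d.getD x 0 + 1)) PySem.Dict.empty).getD z 0 = (new.count z : Int) := by
    intro z
    rw [PySem.Dict.getD_foldl_insert_add_one]
    simp [PySem.Dict.getD_empty]
  have p1 := pass1_dict _ new hav old PySem.Dict.empty []
  have hzero : (fun z => (PySem.Dict.empty : PySem.Dict Int Int).getD z 0) = (fun _ => (0 : Int)) := by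
    funext z; simp [PySem.Dict.getD_empty]
  rw [hzero] at p1
  have hA := passA_eq new old (fun _ => 0) [] (fun _ => le_refl 0)
  rw [skipF_zero] at hA
  have p2 := pass2_dict new _ ((old.foldl (bStep new) (fun _ => 0, [])).1) [] p1.1
  simp only [hA, p1.2, p2, List.nil_append]
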